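-- pv_equiv track=rewrite | github.com/Pliploop/MI-fingerprinting | fingerprinting/evaluation/metrics.py | build_ground_truth
-- ===== SOURCE A (Python) =====
-- def build_ground_truth(query_fingerprints, database_fingerprints):
--     ground_truth = {}
--
--     # Iterate over the query fingerprints
--     for query_file, query_fingerprint in query_fingerprints.items():
--         query_name = query_file.replace('.wav','')
--         ground_truth[query_file] = {}
--
--         # Iterate over the database fingerprints
--         for db_file, db_fingerprint in database_fingerprints.items():
--               # Extract the database item name
--             db_name = db_file.replace('.wav','')
--             ground_truth[query_file][db_file] = 0  # Initialize the boolean value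
--
--             # TODO: Add your logic here to determine whether the fingerprints match
--             if query_name.split('-')[0] == db_name:
--                 ground_truth[query_file][db_file] = 1
--
--     return ground_truth
-- ===== SOURCE B (Python) =====
-- def build_ground_truth(query_fingerprints, database_fingerprints):
--     # Group database files by their stripped name once, then fill each row
--     # from that index instead of comparing every query against every db name.
--     index = {}
--     for db_file in database_fingerprints:
--         index.setdefault(db_file.replace('.wav', ''), []).append(db_file)
--
--     ground_truth = {}
--     for query_file in query_fingerprints:
--         prefix = query_file.replace('.wav', '').split('-')[0]
--         row = dict.fromkeys(database_fingerprints, 0)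
--         for db_file in index.get(prefix, []):
--             row[db_file] = 1
--         ground_truth[query_file] = row
--     return ground_truth
-- ===== Notes on version B (the rewrite author's own statement) =====
-- stated objective: faster
-- what changed: B replaces A's nested query-by-database name comparison with a precomputed index grouping database files by stripped name, then fills a zero row per query by direct lookup of the query prefix in that index.
import Mathlib
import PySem

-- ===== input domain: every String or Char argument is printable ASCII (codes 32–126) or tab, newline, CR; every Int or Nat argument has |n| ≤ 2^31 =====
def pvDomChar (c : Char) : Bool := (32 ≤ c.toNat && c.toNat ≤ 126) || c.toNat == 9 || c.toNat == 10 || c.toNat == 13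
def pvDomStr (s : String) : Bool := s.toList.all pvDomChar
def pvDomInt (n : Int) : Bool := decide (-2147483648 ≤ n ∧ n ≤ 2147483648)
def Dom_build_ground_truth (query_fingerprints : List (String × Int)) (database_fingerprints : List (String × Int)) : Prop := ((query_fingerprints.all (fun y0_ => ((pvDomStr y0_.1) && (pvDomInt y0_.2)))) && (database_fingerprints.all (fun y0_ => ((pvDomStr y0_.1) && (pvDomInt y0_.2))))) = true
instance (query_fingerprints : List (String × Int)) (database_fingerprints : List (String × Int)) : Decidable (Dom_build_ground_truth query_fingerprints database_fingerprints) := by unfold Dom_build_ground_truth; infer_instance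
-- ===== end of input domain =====

-- B builds a name→files index over the database once and fills each query row by a
-- single index lookup, instead of A's per-query scan comparing every database name.

-- ===== PORT A =====
-- Python A iterates the query dict; `ground_truth[query_file] = {}` then mutates that
-- inner dict through the alias in the db loop: the alias is tracked locally as `row`
-- and written back by the final insert (same dict semantics).
-- `query_name.split('-')[0]`: '-' ≠ "" so split? is some, and Python's split never
-- returns an empty list, so `[0]` always succeeds; `.getD []).headD ""` is exact here.
def build_ground_truth (query_fingerprints : List (String × Int)) (database_fingerprints : List (String × Int)) : List (String × List (String × Int)) :=
  let ground_truth : PySem.Dict String (PySem.Dict String Int) := PySem.Dict.empty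
  let ground_truth := query_fingerprints.foldl (fun gt q =>
    let query_name := PySem.Str.replace q.1 ".wav" ""
    let gt := gt.insert q.1 PySem.Dict.empty
    let row := database_fingerprints.foldl (fun row db =>
      let db_name := PySem.Str.replace db.1 ".wav" ""
      let row := row.insert db.1 0
      if ((PySem.Str.split? query_name "-").getD []).headD "" == db_name then
        row.insert db.1 1
      else row) PySem.Dict.empty
    gt.insert q.1 row) ground_truth
  ground_truth.items.map (fun p => (p.1, p.2.items))

-- ===== PORT B =====
-- index.setdefault(name, []).append(db_file) is exactly Dict.modify name [] (· ++ [db_file]).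
def build_ground_truth_alt (query_fingerprints : List (String × Int)) (database_fingerprints : List (String × Int)) : List (String × List (String × Int)) :=
  let index : PySem.Dict String (List String) := database_fingerprints.foldl (fun ix db =>
      ix.modify (PySem.Str.replace db.1 ".wav" "") [] (fun l => l ++ [db.1])) PySem.Dict.empty
  let ground_truth : PySem.Dict String (List (String × Int)) := query_fingerprints.foldl (fun gt q =>
      let pfx := ((PySem.Str.split? (PySem.Str.replace q.1 ".wav" "") "-").getD []).headD ""
      let row0 : PySem.Dict String Int := database_fingerprints.foldl (fun r db => r.insert db.1 0) PySem.Dict.empty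
      let row := (index.getD pfx []).foldl (fun r k => r.insert k 1) row0
      gt.insert q.1 row.items) PySem.Dict.empty
  ground_truth.items

-- ===== PRECONDITION & SPEC =====
def Spec_build_ground_truth (query_fingerprints : List (String × Int)) (database_fingerprints : List (String × Int)) (out : List (String × List (String × Int))) : Prop := out = build_ground_truth_alt query_fingerprints database_fingerprints
instance (query_fingerprints : List (String × Int)) (database_fingerprints : List (String × Int)) (out : List (String × List (String × Int))) : Decidable (Spec_build_ground_truth query_fingerprints database_fingerprints out) := by unfold Spec_build_ground_truth; infer_instance

-- ===== CLAIM (what is proved, stated in full; the proofs are below) =====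
def Claim_equal_build_ground_truth : Prop := ∀ (query_fingerprints : List (String × Int)) (database_fingerprints : List (String × Int)), Dom_build_ground_truth query_fingerprints database_fingerprints → Spec_build_ground_truth query_fingerprints database_fingerprints (build_ground_truth query_fingerprints database_fingerprints)

-- ===== LEMMAS AND PROOFS =====

-- stripped name, query prefix, and the 0/1 match bit
def pvNm (s : String) : String := PySem.Str.replace s ".wav" ""
def pvPf (s : String) : String := ((PySem.Str.split? (pvNm s) "-").getD []).headD ""
def pvBit (q k : String) : Int := if pvPf q == pvNm k then 1 else 0

-- a fold of inserts whose value depends only on the key: lookup characterization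
theorem pv_getD_insert_val {κ ν β : Type} [BEq κ] [LawfulBEq κ] [DecidableEq κ]
    (l : List β) (key : β → κ) (val : κ → ν) (d : PySem.Dict κ ν) (k : κ) (d0 : ν) :
    (l.foldl (fun d a => d.insert (key a) (val (key a))) d).getD k d0
      = if k ∈ l.map key then val k else d.getD k d0 := by
  induction l generalizing d with
  | nil => simp
  | cons a l ih =>
      simp only [List.foldl_cons, List.map_cons, List.mem_cons, ih,
        PySem.Dict.getD_insert]
      by_cases hm : k ∈ l.map key
      · simp [hm]
      · by_cases he : k = key a <;> simp [hm, he]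

-- items of such a fold from the empty dict: dedup'd keys paired with their value
theorem pv_items_insert_val {κ ν β : Type} [BEq κ] [LawfulBEq κ] [DecidableEq κ]
    (l : List β) (key : β → κ) (val : κ → ν) (d0 : ν) :
    (l.foldl (fun d a => d.insert (key a) (val (key a))) (PySem.Dict.empty : PySem.Dict κ ν)).items
      = (PySem.Set.ofList (l.map key)).map (fun k => (k, val k)) := by
  have hk : (l.foldl (fun d a => d.insert (key a) (val (key a))) (PySem.Dict.empty : PySem.Dict κ ν)).keys
      = PySem.Set.ofList (l.map key) := by
    rw [PySem.Dict.keys_foldl_insert_key l key (fun d a => val (key a))]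
    simp [PySem.Set.update_nil_left]
  have hnd : (l.foldl (fun d a => d.insert (key a) (val (key a))) (PySem.Dict.empty : PySem.Dict κ ν)).keys.Nodup := by
    rw [hk]; exact PySem.Set.nodup_ofList _
  rw [PySem.Dict.items_eq_map_keys _ hnd d0, hk]
  apply List.map_congr_left
  intro k hkmem
  have : k ∈ l.map key := (PySem.Set.mem_ofList _ _).mp hkmem
  rw [pv_getD_insert_val, if_pos this]

-- the index B builds: getD at c lists (in order, with multiplicity) the db files whose name is c
theorem pv_index_getD (dbs : List (String × Int)) (c : String) :
    (dbs.foldl (fun ix db =>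
        ix.modify (PySem.Str.replace db.1 ".wav" "") [] (fun l => l ++ [db.1])) (PySem.Dict.empty : PySem.Dict String (List String))).getD c []
      = (dbs.filter (fun db => pvNm db.1 == c)).map (fun db => db.1) := by
  have h : dbs.foldl (fun ix db =>
        ix.modify (PySem.Str.replace db.1 ".wav" "") [] (fun l => l ++ [db.1])) (PySem.Dict.empty : PySem.Dict String (List String))
      = (dbs.map (fun db => (pvNm db.1, db.1))).foldl (fun d p => d.modify p.1 [] (fun x => x ++ [p.2])) PySem.Dict.empty := by
    rw [List.foldl_map]; rfl
  rw [h, PySem.Dict.getD_foldl_modify_append]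
  simp [List.filter_map, Function.comp_def]

-- membership in the index entry at the query prefix
theorem pv_mem_index (dbs : List (String × Int)) (c k : String) :
    k ∈ (dbs.filter (fun db => pvNm db.1 == c)).map (fun db => db.1)
      ↔ k ∈ dbs.map (fun db => db.1) ∧ pvNm k = c := by
  simp only [List.mem_map, List.mem_filter, beq_iff_eq]
  constructor
  · rintro ⟨db, ⟨hdb, hnm⟩, rfl⟩; exact ⟨⟨db, hdb, rfl⟩, hnm⟩
  · rintro ⟨⟨db, hdb, rfl⟩, hnm⟩; exact ⟨db, ⟨hdb, hnm⟩, rfl⟩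

-- B's finished row for a query with prefix c equals A's row of match bits
theorem pv_row_eq (dbs : List (String × Int)) (q : String) :
    (((dbs.filter (fun db => pvNm db.1 == pvPf q)).map (fun db => db.1)).foldl
        (fun r k => r.insert k 1)
        (dbs.foldl (fun r db => r.insert db.1 0) (PySem.Dict.empty : PySem.Dict String Int))).items
      = (PySem.Set.ofList (dbs.map (fun db => db.1))).map (fun k => (k, pvBit q k)) := by
  set m := (dbs.filter (fun db => pvNm db.1 == pvPf q)).map (fun db => db.1) with hm
  set r0 := dbs.foldl (fun r db => r.insert db.1 0) (PySem.Dict.empty : PySem.Dict String Int) with hr0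
  have hk0 : r0.keys = PySem.Set.ofList (dbs.map (fun db => db.1)) := by
    rw [hr0, PySem.Dict.keys_foldl_insert_key dbs (fun db => db.1) (fun _ _ => 0)]
    simp [PySem.Set.update_nil_left]
  have hmem : ∀ y ∈ m, y ∈ r0.keys := by
    intro y hy
    rw [hk0, PySem.Set.mem_ofList]
    exact ((pv_mem_index dbs (pvPf q) y).mp hy).1
  have hkeys : (m.foldl (fun r k => r.insert k 1) r0).keys = r0.keys := by
    rw [PySem.Dict.keys_foldl_insert m (fun _ _ => 1) r0,
      PySem.Set.update_eq_append_filter]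
    have : (PySem.Set.ofList m).filter (fun y => !PySem.Set.contains r0.keys y) = [] := by
      rw [List.filter_eq_nil_iff]
      intro y hy
      simpa using hmem y ((PySem.Set.mem_ofList _ _).mp hy)
    rw [this, List.append_nil]
  have hnd : (m.foldl (fun r k => r.insert k 1) r0).keys.Nodup := by
    rw [hkeys, hk0]; exact PySem.Set.nodup_ofList _
  rw [PySem.Dict.items_eq_map_keys _ hnd 0, hkeys, hk0]
  apply List.map_congr_left
  intro k hkmem
  have hkdb : k ∈ dbs.map (fun db => db.1) := (PySem.Set.mem_ofList _ _).mp hkmem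
  have h1 : (m.foldl (fun r k => r.insert k 1) r0).getD k 0
      = if k ∈ m then 1 else r0.getD k 0 := by
    have := pv_getD_insert_val m (fun x => x) (fun _ => (1 : Int)) r0 k 0
    simpa using this
  have h0 : r0.getD k 0 = 0 := by
    rw [hr0, pv_getD_insert_val dbs (fun db => db.1) (fun _ => (0 : Int))]
    simp [hkdb]
  rw [h1, h0]
  by_cases hmm : k ∈ m
  · have := ((pv_mem_index dbs (pvPf q) k).mp hmm).2
    simp [hmm, pvBit, this]
  · have : ¬ pvNm k = pvPf q := fun h => hmm ((pv_mem_index dbs (pvPf q) k).mpr ⟨hkdb, h⟩)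
    have hne : ¬ pvPf q = pvNm k := fun h => this h.symm
    simp [hmm, pvBit, hne]

-- A's inner db loop is a fold of inserts keyed by db.1 with value pvBit
theorem pv_rowA_body (q : String) :
    (fun (row : PySem.Dict String Int) (db : String × Int) =>
      let db_name := PySem.Str.replace db.1 ".wav" ""
      let row := row.insert db.1 0
      if ((PySem.Str.split? (PySem.Str.replace q ".wav" "") "-").getD []).headD "" == db_name then
        row.insert db.1 1
      else row)
    = (fun row db => row.insert db.1 (pvBit q db.1)) := by
  funext row db
  simp only [pvBit, pvPf, pvNm]
  split_ifs with h
  · rw [PySem.Dict.insert_insert_self]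
  · rfl

theorem build_ground_truth_eq (qs dbs : List (String × Int)) :
    build_ground_truth qs dbs = build_ground_truth_alt qs dbs := by
  unfold build_ground_truth build_ground_truth_alt
  simp only []
  -- A side: collapse the double insert and recognize the fold shapes
  have hA : (qs.foldl (fun gt q =>
      let query_name := PySem.Str.replace q.1 ".wav" ""
      let gt' := gt.insert q.1 PySem.Dict.empty
      let row := dbs.foldl (fun row db =>
        let db_name := PySem.Str.replace db.1 ".wav" ""
        let row := row.insert db.1 0
        if ((PySem.Str.split? query_name "-").getD []).headD "" == db_name then
          row.insert db.1 1
        else row) PySem.Dict.empty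
      gt'.insert q.1 row) (PySem.Dict.empty : PySem.Dict String (PySem.Dict String Int)))
      = qs.foldl (fun gt q => gt.insert q.1
          (dbs.foldl (fun row db => row.insert db.1 (pvBit q.1 db.1)) PySem.Dict.empty))
          PySem.Dict.empty := by
    apply PySem.List.foldl_congr_mem
    intro gt q _
    show (gt.insert q.1 PySem.Dict.empty).insert q.1 _ = _
    rw [PySem.Dict.insert_insert_self]
    rw [pv_rowA_body q.1]
  rw [hA]
  -- B side: rewrite the index lookup into the filtered list
  have hB : (qs.foldl (fun gt q =>
      let pfx := ((PySem.Str.split? (PySem.Str.replace q.1 ".wav" "") "-").getD []).headD ""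
      let row0 : PySem.Dict String Int := dbs.foldl (fun r db => r.insert db.1 0) PySem.Dict.empty
      let row := ((dbs.foldl (fun ix db =>
          ix.modify (PySem.Str.replace db.1 ".wav" "") [] (fun l => l ++ [db.1])) (PySem.Dict.empty : PySem.Dict String (List String))).getD pfx []).foldl
          (fun r k => r.insert k 1) row0
      gt.insert q.1 row.items) (PySem.Dict.empty : PySem.Dict String (List (String × Int))))
      = qs.foldl (fun gt q => gt.insert q.1
          ((PySem.Set.ofList (dbs.map (fun db => db.1))).map (fun k => (k, pvBit q.1 k))))
          PySem.Dict.empty := by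
    apply PySem.List.foldl_congr_mem
    intro gt q _
    show gt.insert q.1 _ = _
    congr 1
    rw [pv_index_getD dbs]
    have hpf : ((PySem.Str.split? (PySem.Str.replace q.1 ".wav" "") "-").getD []).headD "" = pvPf q.1 := rfl
    rw [hpf]
    exact pv_row_eq dbs q.1
  rw [hB]
  -- both are now folds of inserts keyed by q.1 whose value depends only on q.1
  rw [pv_items_insert_val qs (fun q => q.1)
    (fun k => dbs.foldl (fun row db => row.insert db.1 (pvBit k db.1)) PySem.Dict.empty)
    PySem.Dict.empty]
  rw [pv_items_insert_val qs (fun q => q.1)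
    (fun k => (PySem.Set.ofList (dbs.map (fun db => db.1))).map (fun j => (j, pvBit k j)))
    []]
  rw [List.map_map]
  apply List.map_congr_left
  intro k _
  simp only [Function.comp_def]
  congr 1
  rw [pv_items_insert_val dbs (fun db => db.1) (fun j => pvBit k j) 0]

-- ===== VERDICT (by name: the statement is the Claim_ definition above) =====
theorem build_ground_truth_spec : Claim_equal_build_ground_truth := by
  intro qs dbs _
  unfold Spec_build_ground_truth
  exact build_ground_truth_eq qs dbs
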